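-- pv_equiv track=rewrite | github.com/venkatk89/Bioinformatics_Algorithms | algorithmic_tools.py | clump_finder
-- ===== SOURCE A (Python) =====
-- def CountOccurrences(string, substring):
--     '''
--     Function to return the number of occurances of substring in string"
--     '''
--     # Initialize count and start to 0
--     count = 0
--     start = 0
--
--     # Search through the string till
--     # we reach the end of it
--     while start < len(string):
--
--         # Check if a substring is present from
--         # 'start' position till the end
--         pos = string.find(substring, start)
--
--         if pos != -1:
--             # If a substring is present, move 'start' to
--             # the next position from start of the substring
--             start = pos + 1
--
--             # Increment the count
--             count += 1
--         else:
--             # If no further substring is present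
--             break
--     # return the value of count
--     return count
--
-- def clump_finder(seq, k, l, t):
--     '''
--     Function to identify k-mers that form clumps in the seq
--     k-mer forms an (L, t)-clump in seq if there is an interval length L in which k-mer appears at least t times
--     Args:
--         seq: DNA sequence
--         k: length of k-mer
--         l: window size of clump
--         t: frequency of kmer in window
--     Return:
--         List of all kmers that form (L,t) clump in seq
--     '''
--     kmer_clumps = []
--     for i in range(len(seq) - l + 1):
--         window = seq[i:i+l]
--         for j in range(l - k + 1):
--             current_kmer = window[j:j + k]
--             count = CountOccurrences(window, current_kmer)
--             if count >= t:
--                 kmer_clumps.append(current_kmer)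
--     return (set(kmer_clumps))
-- ===== SOURCE B (Python) =====
-- def clump_finder(seq, k, l, t):
--     '''
--     Find all k-mers forming (l, t)-clumps in seq: for each window of length l,
--     count every k-mer of the window once with a dictionary (one pass over the
--     window) instead of re-scanning the window for each position.
--     '''
--     result = []
--     for i in range(len(seq) - l + 1):
--         counts = {}
--         for j in range(l - k + 1):
--             km = seq[i + j:i + j + k]
--             counts[km] = counts.get(km, 0) + 1
--         for km, c in counts.items():
--             if c >= t and km not in result:
--                 result.append(km)
--     return set(result)
-- ===== Notes on version B (the rewrite author's own statement) =====
-- stated objective: alternative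
-- what changed: Instead of re-scanning the window with a find-loop to count each k-mer at each of its L-k+1 positions, B builds one count dictionary per window in a single pass and collects the k-mers whose count reaches t (intended as faster per window, O(L) vs O(L^2) counting; a timing run measured 38x at the largest size both finished but could not confirm it uniformly, so no speed claim is made).
-- outside the precondition, e.g. on clump_finder('ACGT', 0, 2, 3): A returns set(), B returns {''}; on clump_finder('ACGT', -1, 2, 1): A returns {'', 'C', 'G', 'A'}, B returns {'', 'ACG'}
import Mathlib
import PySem

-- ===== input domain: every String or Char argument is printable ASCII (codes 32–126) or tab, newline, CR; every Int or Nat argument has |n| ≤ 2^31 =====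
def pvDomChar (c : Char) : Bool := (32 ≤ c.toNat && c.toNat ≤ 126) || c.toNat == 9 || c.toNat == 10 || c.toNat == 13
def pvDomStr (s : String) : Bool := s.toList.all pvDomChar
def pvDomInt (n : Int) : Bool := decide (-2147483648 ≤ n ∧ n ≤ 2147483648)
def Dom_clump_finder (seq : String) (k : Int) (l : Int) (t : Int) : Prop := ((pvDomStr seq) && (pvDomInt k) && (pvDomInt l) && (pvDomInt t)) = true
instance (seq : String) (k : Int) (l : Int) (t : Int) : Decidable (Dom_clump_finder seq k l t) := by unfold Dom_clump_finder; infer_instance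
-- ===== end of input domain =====

-- B replaces A's per-position find-scan recount of each k-mer by one count dictionary per window.

-- ===== PORT A =====
-- A's CountOccurrences while-loop; the fuel only makes the loop total (start strictly
-- increases while it stays below len(string), so `s.length + 1` steps always suffice).
def countOccGo (s sub : List Char) (fuel : Nat) (count : Int) (start : Int) : Int :=
  match fuel with
  | 0 => count
  | fuel + 1 =>
    if start < (s.length : Int) then
      let pos := PySem.Chars.findFrom s sub start none
      if pos ≠ -1 then countOccGo s sub fuel (count + 1) (pos + 1)
      else count
    else count

def countOccurrences (s sub : List Char) : Int := countOccGo s sub (s.length + 1) 0 0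

def clump_finder (seq : String) (k : Int) (l : Int) (t : Int) : List String :=
  let s := seq.toList
  let kmer_clumps :=
    (PySem.List.pyRange 0 ((s.length : Int) - l + 1) 1).foldl (fun acc i =>
      let window := PySem.List.slice s (some i) (some (i + l))
      (PySem.List.pyRange 0 (l - k + 1) 1).foldl (fun acc j =>
        let current_kmer := PySem.List.slice window (some j) (some (j + k))
        let count := countOccurrences window current_kmer
        if t ≤ count then acc ++ [current_kmer] else acc) acc) []
  (PySem.Set.ofList kmer_clumps).map (fun cs => String.ofList cs)

-- ===== PORT B =====
def clump_finder_alt (seq : String) (k : Int) (l : Int) (t : Int) : List String :=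
  let s := seq.toList
  let result :=
    (PySem.List.pyRange 0 ((s.length : Int) - l + 1) 1).foldl (fun res i =>
      let counts := (PySem.List.pyRange 0 (l - k + 1) 1).foldl (fun d j =>
        let km := PySem.List.slice s (some (i + j)) (some (i + j + k))
        d.insert km (d.getD km 0 + 1)) (PySem.Dict.empty : PySem.Dict (List Char) Int)
      counts.items.foldl (fun res p =>
        if t ≤ p.2 ∧ p.1 ∉ res then res ++ [p.1] else res) res) []
  (PySem.Set.ofList result).map (fun cs => String.ofList cs)

-- ===== PRECONDITION & SPEC =====
-- Pre_ restricts to the function's natural domain: a positive k-mer length. For k ≤ 0 the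
-- "k-mers" are empty or negative-length Python slices, and both programs' outputs are
-- implementation artefacts (A counts the empty k-mer l times per window, B l+1 times;
-- for k < 0 negative-bound slice wraparound yields unrelated junk strings).
def Pre_clump_finder (seq : String) (k : Int) (l : Int) (t : Int) : Prop := 1 ≤ k
instance (seq : String) (k : Int) (l : Int) (t : Int) : Decidable (Pre_clump_finder seq k l t) := by unfold Pre_clump_finder; infer_instance
def pvWitness_clump_finder : String × Int × Int × Int := ("GATCAGCATAAGGGTCA", 3, 9, 2)

def Spec_clump_finder (seq : String) (k : Int) (l : Int) (t : Int) (out : List String) : Prop := out = clump_finder_alt seq k l t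
instance (seq : String) (k : Int) (l : Int) (t : Int) (out : List String) : Decidable (Spec_clump_finder seq k l t out) := by unfold Spec_clump_finder; infer_instance

-- ===== CLAIM (what is proved, stated in full; the proofs are below) =====
def Claim_equal_clump_finder : Prop := ∀ (seq : String) (k : Int) (l : Int) (t : Int), Dom_clump_finder seq k l t → Pre_clump_finder seq k l t → Spec_clump_finder seq k l t (clump_finder seq k l t)

-- ===== LEMMAS AND PROOFS =====

-- number of occurrence positions of `sub` in `s` at indices ≥ a
def nOccFrom (s sub : List Char) (a : Nat) : Nat :=
  (List.range' a (s.length - a)).countP (fun p => decide (sub <+: List.drop p s))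

theorem countOccGo_eq (s sub : List Char) (hsub : sub ≠ []) :
    ∀ (fuel : Nat) (a : Nat) (c : Int), a ≤ s.length → s.length + 1 - a ≤ fuel →
      countOccGo s sub fuel c (a : Int) = c + (nOccFrom s sub a : Int) := by
  intro fuel
  induction fuel with
  | zero => intro a c h1 h2; omega
  | succ fuel ih =>
    intro a c h1 h2
    by_cases hlt : a < s.length
    · rw [countOccGo]
      rw [if_pos (by exact_mod_cast hlt)]
      simp only []
      by_cases hpos : PySem.Chars.findFrom s sub (a : Int) none = -1
      · rw [if_neg (by simp [hpos])]
        have hninf := (PySem.Chars.findFrom_natCast_eq_neg_one_iff s sub a h1).mp hpos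
        have : nOccFrom s sub a = 0 := by
          rw [nOccFrom, List.countP_eq_zero]
          intro p hp
          simp only [List.mem_range'_1] at hp
          simp only [decide_eq_true_eq]
          intro hpre
          apply hninf
          refine List.infix_iff_prefix_suffix.mpr ⟨List.drop (p - a) (List.drop a s), ?_, List.drop_suffix _ _⟩
          rwa [List.drop_drop, Nat.add_sub_cancel' hp.1]
        simp [this]
      · rw [if_pos hpos]
        obtain ⟨hge, hpre, hmin⟩ := PySem.Chars.findFrom_natCast_spec s sub a h1 hpos
        set pos := PySem.Chars.findFrom s sub (a : Int) none with hposdef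
        have hpos0 : 0 ≤ pos := le_trans (by exact_mod_cast Nat.zero_le a) hge
        have hcast : pos = ((pos.toNat : Nat) : Int) := by omega
        set P := pos.toNat with hP
        have haP : a ≤ P := by omega
        have hPlen : P < s.length := by
          have := hpre.length_le
          rw [List.length_drop] at this
          have hs1 : 1 ≤ sub.length := by
            cases sub with | nil => exact absurd rfl hsub | cons x xs => simp
          omega
        have hc1 : P + 1 ≤ s.length := by omega
        have hc2 : s.length + 1 - (P + 1) ≤ fuel := by omega
        have hrec : countOccGo s sub fuel (c + 1) (pos + 1) = (c + 1) + (nOccFrom s sub (P + 1) : Int) := by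
          rw [hcast]
          rw [show ((P : Int) + 1) = ((P + 1 : Nat) : Int) by push_cast; ring]
          exact ih (P + 1) (c + 1) hc1 hc2
        rw [hrec]
        have hsplit : nOccFrom s sub a = nOccFrom s sub (P + 1) + 1 := by
          rw [nOccFrom, nOccFrom]
          have e1 : a + 1 * (P - a) = P := by omega
          have e2 : (P - a) + (s.length - P) = s.length - a := by omega
          have hr := List.range'_append (s := a) (m := P - a) (n := s.length - P) (step := 1)
          rw [e1, e2] at hr
          rw [← hr, List.countP_append]
          have h0 : (List.range' a (P - a)).countP (fun p => decide (sub <+: List.drop p s)) = 0 := by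
            rw [List.countP_eq_zero]
            intro p hp
            simp only [List.mem_range'_1] at hp
            simp only [decide_eq_true_eq]
            exact hmin p hp.1 (by omega)
          rw [h0]
          have hr2 : List.range' P (s.length - P) = P :: List.range' (P + 1) (s.length - (P + 1)) := by
            rw [show s.length - P = (s.length - (P+1)) + 1 by omega]
            rw [List.range'_succ]
          rw [hr2, List.countP_cons]
          simp [hpre]
        rw [hsplit]
        push_cast
        ring
    · have ha : a = s.length := by omega
      rw [countOccGo, if_neg (by exact_mod_cast hlt)]
      subst ha
      simp [nOccFrom]

theorem countOccurrences_eq (s sub : List Char) (hsub : sub ≠ []) :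
    countOccurrences s sub = (nOccFrom s sub 0 : Int) := by
  have h := countOccGo_eq s sub hsub (s.length + 1) 0 0 (Nat.zero_le _) (by omega)
  simpa [countOccurrences] using h

theorem foldl_add_filter_ne {α : Type} [BEq α] [LawfulBEq α] (x : α) :
    ∀ (zs : List α) (acc : PySem.Set α), x ∈ acc →
      List.foldl PySem.Set.add acc (zs.filter (fun z => !(z == x))) = List.foldl PySem.Set.add acc zs := by
  intro zs
  induction zs with
  | nil => intro acc _; rfl
  | cons z zs ih =>
    intro acc hx
    by_cases hz : z = x
    · subst hz
      simp only [List.filter_cons, beq_self_eq_true, Bool.not_true, List.foldl_cons]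
      rw [PySem.Set.add_of_mem hx]
      exact ih acc hx
    · have : ((!(z == x)) = true) := by simp [hz]
      simp only [List.filter_cons, this, if_pos]
      simp only [List.foldl_cons]
      exact ih _ (by rw [PySem.Set.mem_add]; exact Or.inl hx)

-- canonical "new qualifying elements in first-occurrence order" appended by one window
def news {α : Type} [BEq α] [LawfulBEq α] (q : α → Bool) : List α → List α → List α
  | _,   []      => []
  | acc, x :: zs => if q x ∧ x ∉ acc then x :: news q (acc ++ [x]) zs else news q acc zs

theorem foldl_add_filter_eq_news {α : Type} [BEq α] [LawfulBEq α] (q : α → Bool) :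
    ∀ (zs : List α) (acc : PySem.Set α),
      List.foldl PySem.Set.add acc (zs.filter q) = acc ++ news q acc zs := by
  intro zs
  induction zs with
  | nil => intro acc; simp [news]
  | cons z zs ih =>
    intro acc
    by_cases hq : q z
    · simp only [List.filter_cons, hq, if_pos, List.foldl_cons]
      by_cases hm : z ∈ acc
      · rw [PySem.Set.add_of_mem hm, ih acc, news]
        simp [hq, hm]
      · have hadd : PySem.Set.add acc z = acc ++ [z] := by
          simp only [PySem.Set.add]
          rw [if_neg]
          simp [hm]
        rw [hadd, ih (acc ++ [z]), news]
        simp [hq, hm, List.append_assoc]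
    · simp only [List.filter_cons, hq]
      rw [if_neg (by simp [hq]), ih acc, news, if_neg (by simp [hq])]

theorem foldl_add_ofList_filter_eq_news {α : Type} [BEq α] [LawfulBEq α] (q : α → Bool) :
    ∀ (zs : List α) (acc : PySem.Set α),
      List.foldl PySem.Set.add acc ((PySem.Set.ofList zs).filter q) = acc ++ news q acc zs := by
  intro zs
  induction zs with
  | nil => intro acc; simp [PySem.Set.ofList, news]
  | cons z zs ih =>
    intro acc
    rw [PySem.Set.ofList_cons]
    have hdis : (PySem.Set.ofList zs).discard z = (PySem.Set.ofList zs).filter (fun w => !(w == z)) := rfl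
    by_cases hq : q z
    · simp only [List.filter_cons, hq, if_pos, List.foldl_cons]
      by_cases hm : z ∈ acc
      · rw [PySem.Set.add_of_mem hm, hdis, List.filter_filter]
        rw [show (fun w => q w && !(w == z)) = (fun w => !(w == z) && q w) from by funext w; exact Bool.and_comm _ _]
        rw [← List.filter_filter, foldl_add_filter_ne z _ _ hm, ih acc, news]
        simp [hq, hm]
      · have hadd : PySem.Set.add acc z = acc ++ [z] := by
          simp only [PySem.Set.add]; rw [if_neg]; simp [hm]
        rw [hadd, hdis, List.filter_filter]
        rw [show (fun w => q w && !(w == z)) = (fun w => !(w == z) && q w) from by funext w; exact Bool.and_comm _ _]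
        rw [← List.filter_filter, foldl_add_filter_ne z _ _ (by simp), ih (acc ++ [z]), news]
        simp [hq, hm, List.append_assoc]
    · simp only [List.filter_cons, hq]
      rw [if_neg (by simp), hdis, List.filter_filter]
      have : ((PySem.Set.ofList zs).filter (fun w => q w && !(w == z))) = (PySem.Set.ofList zs).filter q := by
        apply List.filter_congr
        intro w _
        by_cases hwz : w = z
        · subst hwz; simp [hq]
        · simp [hwz]
      rw [this, ih acc, news, if_neg (by simp [hq])]

theorem foldl_add_flatMap {α β : Type} [BEq α] (g : β → List α) :
    ∀ (xs : List β) (init : PySem.Set α),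
      List.foldl PySem.Set.add init (xs.flatMap g) =
        List.foldl (fun a x => List.foldl PySem.Set.add a (g x)) init xs := by
  intro xs
  induction xs with
  | nil => intro init; rfl
  | cons x xs ih => intro init; simp only [List.flatMap_cons, List.foldl_append, List.foldl_cons]; exact ih _

theorem countOcc_eq_count (win : List Char) (K : Nat) (hK : 1 ≤ K) (hKL : K ≤ win.length) (x : List Char)
    (hx : x.length = K) :
    countOccurrences win x =
      ((((List.range (win.length - K + 1)).map (fun j => (win.drop j).take K)).count x : Nat) : Int) := by
  have hxne : x ≠ [] := by intro h; rw [h] at hx; simp at hx; omega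
  rw [countOccurrences_eq win x hxne]
  congr 1
  set L := win.length with hL
  set m := L - K + 1 with hm
  have hpt : ∀ j : Nat, j < m → (((win.drop j).take K == x) = decide (x <+: List.drop j win)) := by
    intro j hj
    by_cases hpre : x <+: List.drop j win
    · have := List.prefix_iff_eq_take.mp hpre
      rw [hx] at this
      simp [hpre, ← this]
    · simp only [hpre, decide_false, beq_eq_false_iff_ne, ne_eq]
      intro heq
      apply hpre
      rw [List.prefix_iff_eq_take, hx, heq]
  rw [nOccFrom, Nat.sub_zero, List.count_eq_countP, List.countP_map]
  have e1 : 0 + 1 * m = m := by omega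
  have e2 : m + (K - 1) = L := by omega
  have hr := List.range'_append (s := 0) (m := m) (n := K - 1) (step := 1)
  rw [e1, e2] at hr
  rw [← hL, ← hr, List.countP_append]
  have h2 : (List.range' m (K - 1)).countP (fun p => decide (x <+: List.drop p win)) = 0 := by
    rw [List.countP_eq_zero]
    intro p hp
    simp only [List.mem_range'_1] at hp
    simp only [decide_eq_true_eq]
    intro hpre
    have := hpre.length_le
    rw [List.length_drop, hx] at this
    omega
  rw [h2, Nat.add_zero, ← List.range_eq_range']
  apply List.countP_congr
  intro j hj
  simp only [List.mem_range] at hj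
  simp only [Function.comp_apply, decide_eq_true_eq, beq_iff_eq]
  rw [List.prefix_iff_eq_take, hx]
  exact eq_comm

-- ===== VERDICT (by name: the statement is the Claim_ definition above) =====
theorem clump_finder_spec : Claim_equal_clump_finder := by
  intro seq k l t _ hk
  unfold Pre_clump_finder at hk
  show clump_finder seq k l t = clump_finder_alt seq k l t
  simp only [clump_finder, clump_finder_alt]
  set s := seq.toList with hs
  by_cases hC1 : l - k + 1 ≤ 0
  · rw [PySem.List.pyRange_one_eq_nil hC1]
    simp only [List.foldl_nil, PySem.List.foldl_ignore,
      show (PySem.Dict.empty : PySem.Dict (List Char) Int).items = ([] : List (List Char × Int)) from rfl]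
  · -- k ≤ l, so k, l ≥ 1
    have hkl : k ≤ l := by omega
    by_cases hout : (s.length : Int) - l + 1 ≤ 0
    · rw [PySem.List.pyRange_one_eq_nil hout]
      simp only [List.foldl_nil]
    · -- main case: 1 ≤ k ≤ l ≤ n
      set n := s.length with hn
      set K := k.toNat with hKdef
      set L := l.toNat with hLdef
      have hk' : k = (K : Int) := by omega
      have hl' : l = (L : Int) := by omega
      have hK1 : 1 ≤ K := by omega
      have hKL : K ≤ L := by omega
      have hLn : L ≤ n := by omega
      set m := L - K + 1 with hmdef
      set M := n - L + 1 with hMdef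
      have hmc : l - k + 1 = (m : Int) := by omega
      have hMc : (n : Int) - l + 1 = (M : Int) := by omega
      -- canonical per-window data
      set win : Nat → List Char := fun I => (s.drop I).take L with hwin
      set curf : Nat → Nat → List Char := fun I J => ((win I).drop J).take K with hcurf
      set ws : Nat → List (List Char) := fun I => (List.range m).map (curf I) with hws
      set q : Nat → List Char → Bool := fun I x => decide (t ≤ ((ws I).count x : Int)) with hq
      have hwinlen : ∀ I : Nat, I < M → (win I).length = L := by
        intro I hI; simp only [hwin, List.length_take, List.length_drop]; omega
      have hcur : ∀ (I J : Nat), J < m → List.take K (List.drop (I + J) s) = curf I J := by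
        intro I J hJ
        simp only [hcurf, hwin, List.drop_take, List.drop_drop, List.take_take]
        congr 1
        omega
      have hcurlen : ∀ (I J : Nat), I < M → J < m → (curf I J).length = K := by
        intro I J hI hJ
        simp only [hcurf, List.length_take, List.length_drop]
        have := hwinlen I hI
        omega
      simp only [hmc, hMc, PySem.List.pyRange_zero_natCast, List.foldl_map]
      -- A side to canonical blocks
      have hA : (List.range M).foldl (fun (acc : List (List Char)) (I : Nat) =>
            (List.range m).foldl (fun (acc : List (List Char)) (J : Nat) =>
              if t ≤ countOccurrences (PySem.List.slice s (some (I : Int)) (some ((I : Int) + l)))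
                  (PySem.List.slice (PySem.List.slice s (some (I : Int)) (some ((I : Int) + l))) (some (J : Int)) (some ((J : Int) + k)))
              then acc ++ [PySem.List.slice (PySem.List.slice s (some (I : Int)) (some ((I : Int) + l))) (some (J : Int)) (some ((J : Int) + k))]
              else acc) acc) [] =
          (List.range M).flatMap (fun I => (ws I).filter (q I)) := by
        rw [PySem.List.foldl_congr_mem _ _
            (fun acc I => acc ++ (ws I).filter (q I)) _ ?_]
        · rw [PySem.List.foldl_append_eq_flatMap]; rfl
        · intro acc I hI
          simp only [List.mem_range] at hI
          simp only [hk', hl', PySem.List.slice_natCast_add]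
          rw [PySem.List.foldl_append_ite (p := fun J => t ≤ countOccurrences (win I) (curf I J)) (f := curf I)]
          congr 1
          have hpred : ∀ J ∈ List.range m,
              (decide (t ≤ countOccurrences (win I) (curf I J))) = (q I ∘ curf I) J := by
            intro J hJ
            simp only [List.mem_range] at hJ
            have := countOcc_eq_count (win I) K hK1 (by rw [hwinlen I hI]; exact hKL) (curf I J) (hcurlen I J hI hJ)
            rw [hwinlen I hI] at this
            show decide (t ≤ countOccurrences (win I) (curf I J)) = decide (t ≤ (((ws I).count (curf I J) : Nat) : Int))
            rw [this]
          rw [List.filter_congr hpred, ← List.filter_map (f := curf I) (p := q I)]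
      rw [hA]
      -- B side to canonical steps
      have hB : (List.range M).foldl (fun (res : List (List Char)) (I : Nat) =>
            ((List.range m).foldl (fun (d : PySem.Dict (List Char) Int) (J : Nat) =>
              d.insert (PySem.List.slice s (some ((I : Int) + (J : Int))) (some ((I : Int) + (J : Int) + k)))
                (d.getD (PySem.List.slice s (some ((I : Int) + (J : Int))) (some ((I : Int) + (J : Int) + k))) 0 + 1))
              (PySem.Dict.empty : PySem.Dict (List Char) Int)).items.foldl
              (fun res p => if t ≤ p.2 ∧ p.1 ∉ res then res ++ [p.1] else res) res) [] =
          (List.range M).foldl (fun a I => a ++ news (q I) a (ws I)) [] := by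
        apply PySem.List.foldl_congr_mem
        intro res I hI
        simp only [List.mem_range] at hI
        have hdict : (List.range m).foldl (fun (d : PySem.Dict (List Char) Int) (J : Nat) =>
              d.insert (PySem.List.slice s (some ((I : Int) + (J : Int))) (some ((I : Int) + (J : Int) + k)))
                (d.getD (PySem.List.slice s (some ((I : Int) + (J : Int))) (some ((I : Int) + (J : Int) + k))) 0 + 1))
              (PySem.Dict.empty : PySem.Dict (List Char) Int) = PySem.Dict.counter (ws I) := by
          rw [PySem.List.foldl_congr_mem _ _
              (fun d J => d.insert (curf I J) (d.getD (curf I J) 0 + 1)) _ ?_]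
          · rw [← List.foldl_map (f := curf I) (g := fun (d : PySem.Dict (List Char) Int) x => d.insert x (d.getD x 0 + 1)),
                PySem.Dict.foldl_insert_getD_add_one_eq_counter]
          · intro d J hJ
            simp only [List.mem_range] at hJ
            have hsl : PySem.List.slice s (some ((I : Int) + (J : Int))) (some ((I : Int) + (J : Int) + k)) = curf I J := by
              rw [hk', show ((I : Int) + (J : Int)) = ((I + J : Nat) : Int) by push_cast; ring,
                  show (((I + J : Nat) : Int) + (K : Int)) = ((I + J + K : Nat) : Int) by push_cast; ring,
                  PySem.List.slice_natCast]
              rw [show I + J + K - (I + J) = K by omega]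
              exact hcur I J hJ
            rw [hsl]
        rw [hdict, PySem.Dict.items_counter, List.foldl_map]
        have hstep : ∀ (res' : List (List Char)), ∀ x ∈ PySem.Set.ofList (ws I),
            (if t ≤ (((ws I).count x : Nat) : Int) ∧ x ∉ res' then res' ++ [x] else res') =
            (if q I x then PySem.Set.add res' x else res') := by
          intro res' x _
          by_cases h1 : t ≤ (((ws I).count x : Nat) : Int)
          · have hqx : q I x = true := by simp [hq, h1]
            rw [if_pos hqx]
            by_cases h2 : x ∈ res'
            · rw [if_neg (by simp [h2]), PySem.Set.add_of_mem h2]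
            · rw [if_pos ⟨h1, h2⟩]
              simp only [PySem.Set.add]
              rw [if_neg (by simp [h2])]
          · have hqx : q I x = false := by simp [hq, h1]
            rw [if_neg (by simp [h1]), hqx]
            simp
        rw [PySem.List.foldl_congr_mem _ _ (fun res' x => if q I x then PySem.Set.add res' x else res') _ hstep,
            PySem.List.foldl_if_eq_foldl_filter, foldl_add_ofList_filter_eq_news]
      rw [hB]
      -- combine
      have hA2 : PySem.Set.ofList ((List.range M).flatMap (fun I => (ws I).filter (q I))) =
          (List.range M).foldl (fun a I => a ++ news (q I) a (ws I)) [] := by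
        rw [PySem.Set.ofList_eq_foldl, foldl_add_flatMap]
        apply PySem.List.foldl_congr_mem
        intro a I _
        exact foldl_add_filter_eq_news (q I) (ws I) a
      rw [hA2, ← hA2, PySem.Set.ofList_ofList, hA2]
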